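-- pv_equiv track=rewrite | github.com/ArturMosk/Python_Basic-Skillbox- | Module20/09_competition_protocol/main.py | search_and_print_winners
-- ===== SOURCE A (Python) =====
-- def search_and_print_winners(records):
--     max_result = 0
--     max_name = ''
--     for number in sorted(records.keys()):
--         if records[number][0] > max_result:
--             max_result = records[number][0]
--             max_name = records[number][1]
--
--     return max_name, max_result
-- ===== SOURCE B (Python) =====
-- def search_and_print_winners(records):
--     best = max((v[0] for v in records.values()), default=0)
--     if best <= 0:
--         return '', 0
--     k = min(key for key, v in records.items() if v[0] == best)
--     return records[k][1], best
-- ===== Notes on version B (the rewrite author's own statement) =====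
-- stated objective: alternative
-- what changed: Replaced A's sort-all-keys-then-linear-scan accumulator with a direct max over the values followed by a min over the keys that attain it (no sorting, no running state).
import Mathlib
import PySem

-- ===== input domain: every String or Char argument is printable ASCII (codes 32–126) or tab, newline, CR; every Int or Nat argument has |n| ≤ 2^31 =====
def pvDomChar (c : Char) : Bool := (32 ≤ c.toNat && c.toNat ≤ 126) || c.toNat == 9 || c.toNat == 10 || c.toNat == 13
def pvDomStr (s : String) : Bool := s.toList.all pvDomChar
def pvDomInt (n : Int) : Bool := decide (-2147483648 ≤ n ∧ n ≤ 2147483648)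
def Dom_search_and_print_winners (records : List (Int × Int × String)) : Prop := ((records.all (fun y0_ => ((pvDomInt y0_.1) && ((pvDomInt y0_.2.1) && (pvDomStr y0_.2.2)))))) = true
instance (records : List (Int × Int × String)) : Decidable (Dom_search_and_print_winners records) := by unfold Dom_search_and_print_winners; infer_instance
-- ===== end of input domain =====

-- B replaces A's sort-then-scan by a max over values then a min over the attaining keys; alternative decomposition, no speed claim.

-- ===== PORT A =====
-- for number in sorted(records.keys()): if records[number][0] > max_result: update.
-- records[number] is an always-successful dict lookup (number comes from records.keys()); ported as first-match find?.
def search_and_print_winners (records : List (Int × Int × String)) : String × Int :=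
  let r := (PySem.List.sorted (records.map (·.1)) (fun x => x) false).foldl
    (fun (acc : Int × String) (number : Int) =>
      match records.find? (fun p => p.1 == number) with
      | some p => if p.2.1 > acc.1 then (p.2.1, p.2.2) else acc
      | none => acc)
    (0, "")
  (r.2, r.1)

-- ===== PORT B =====
def search_and_print_winners_alt (records : List (Int × Int × String)) : String × Int :=
  let best := match PySem.List.max? (records.map (fun p => p.2.1)) (fun x => x) with
    | some m => m
    | none => 0
  if best ≤ 0 then ("", 0)
  else
    let k := (PySem.List.min? ((records.filter (fun p => p.2.1 == best)).map (·.1)) (fun x => x)).getD 0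
    match records.find? (fun p => p.1 == k) with
    | some p => (p.2.2, best)
    | none => ("", best)

-- ===== PRECONDITION & SPEC =====
-- The association list stands for a Python dict, whose keys are necessarily distinct; lists with
-- duplicate keys represent no dict input of A, so they are excluded.
def Pre_search_and_print_winners (records : List (Int × Int × String)) : Prop :=
  (records.map (·.1)).Nodup
instance (records : List (Int × Int × String)) : Decidable (Pre_search_and_print_winners records) := by unfold Pre_search_and_print_winners; infer_instance
def pvWitness_search_and_print_winners : (List (Int × Int × String)) := [(2, 5, "ann"), (1, 3, "bob")]

def Spec_search_and_print_winners (records : List (Int × Int × String)) (out : String × Int) : Prop := out = search_and_print_winners_alt records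
instance (records : List (Int × Int × String)) (out : String × Int) : Decidable (Spec_search_and_print_winners records out) := by unfold Spec_search_and_print_winners; infer_instance

-- ===== CLAIM (what is proved, stated in full; the proofs are below) =====
def Claim_equal_search_and_print_winners : Prop := ∀ (records : List (Int × Int × String)), Dom_search_and_print_winners records → Pre_search_and_print_winners records → Spec_search_and_print_winners records (search_and_print_winners records)

-- ===== LEMMAS AND PROOFS =====

-- proof-only helpers (naming the pieces of port A's fold)
def pvFind (records : List (Int × Int × String)) (k : Int) : Option (Int × Int × String) :=
  records.find? (fun p => p.1 == k)

def pvVal (records : List (Int × Int × String)) (k : Int) : Int :=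
  match pvFind records k with
  | some p => p.2.1
  | none => 0

def pvName (records : List (Int × Int × String)) (k : Int) : String :=
  match pvFind records k with
  | some p => p.2.2
  | none => ""

def pvStep (records : List (Int × Int × String)) (acc : Int × String) (number : Int) : Int × String :=
  match pvFind records number with
  | some p => if p.2.1 > acc.1 then (p.2.1, p.2.2) else acc
  | none => acc

def pvRunMax (records : List (Int × Int × String)) (s : List Int) (m : Int) : Int :=
  s.foldl (fun a k => max a (pvVal records k)) m

theorem pvPortA_eq (records : List (Int × Int × String)) :
    search_and_print_winners records =
      (((PySem.List.sorted (records.map (·.1)) (fun x => x) false).foldl (pvStep records) (0, "")).2,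
       ((PySem.List.sorted (records.map (·.1)) (fun x => x) false).foldl (pvStep records) (0, "")).1) := rfl

theorem pvRunMax_ge (records : List (Int × Int × String)) :
    ∀ (s : List Int) (m : Int), m ≤ pvRunMax records s m := by
  intro s
  induction s with
  | nil => intro m; exact le_refl m
  | cons k t ih =>
      intro m
      calc m ≤ max m (pvVal records k) := le_max_left _ _
        _ ≤ pvRunMax records t (max m (pvVal records k)) := ih _
        _ = pvRunMax records (k :: t) m := rfl

theorem pvRunMax_mem_le (records : List (Int × Int × String)) :
    ∀ (s : List Int) (m : Int) (k : Int), k ∈ s → pvVal records k ≤ pvRunMax records s m := by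
  intro s
  induction s with
  | nil => intro m k hk; cases hk
  | cons a t ih =>
      intro m k hk
      rcases List.mem_cons.mp hk with h | h
      · subst h
        calc pvVal records k ≤ max m (pvVal records k) := le_max_right _ _
          _ ≤ pvRunMax records t (max m (pvVal records k)) := pvRunMax_ge records t _
          _ = pvRunMax records (k :: t) m := rfl
      · exact ih _ _ h

theorem pvRunMax_cases (records : List (Int × Int × String)) :
    ∀ (s : List Int) (m : Int),
      pvRunMax records s m = m ∨ ∃ k ∈ s, pvVal records k = pvRunMax records s m := by
  intro s
  induction s with
  | nil => intro m; exact Or.inl rfl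
  | cons a t ih =>
      intro m
      have hstep : pvRunMax records (a :: t) m = pvRunMax records t (max m (pvVal records a)) := rfl
      rcases ih (max m (pvVal records a)) with h | ⟨k, hk, hv⟩
      · by_cases hva : pvVal records a ≤ m
        · left; rw [hstep, h, max_eq_left hva]
        · right
          refine ⟨a, List.mem_cons_self, ?_⟩
          rw [hstep, h, max_eq_right (by omega)]
      · right; exact ⟨k, List.mem_cons_of_mem _ hk, by rw [hstep, ← hv]⟩

theorem pvFold_char (records : List (Int × Int × String)) :
    ∀ (s : List Int) (m : Int) (n : String), 0 ≤ m →
      s.foldl (pvStep records) (m, n) =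
        if pvRunMax records s m = m then (m, n)
        else (pvRunMax records s m,
              ((s.find? (fun k => pvVal records k == pvRunMax records s m)).map
                 (pvName records)).getD n) := by
  intro s
  induction s with
  | nil => intro m n _; simp [pvRunMax]
  | cons a t ih =>
      intro m n hm
      have hRge : ∀ (m' : Int), m' ≤ pvRunMax records t m' := fun m' => pvRunMax_ge records t m'
      have hstepR : pvRunMax records (a :: t) m = pvRunMax records t (max m (pvVal records a)) := rfl
      have hfold : (a :: t).foldl (pvStep records) (m, n) =
          t.foldl (pvStep records) (pvStep records (m, n) a) := rfl
      cases hf : pvFind records a with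
      | none =>
          have hva : pvVal records a = 0 := by simp [pvVal, hf]
          have hstep : pvStep records (m, n) a = (m, n) := by
            unfold pvStep; rw [hf]
          have hmax : max m (pvVal records a) = m := by rw [hva]; exact max_eq_left hm
          rw [hfold, hstep, ih m n hm, hstepR, hmax]
          by_cases hR : pvRunMax records t m = m
          · simp [hR]
          · have hRgt : m < pvRunMax records t m := lt_of_le_of_ne (hRge m) (Ne.symm hR)
            rw [if_neg hR, if_neg hR,
                List.find?_cons_of_neg (by rw [hva]; simp; omega)]
      | some p =>
          have hva : pvVal records a = p.2.1 := by simp [pvVal, hf]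
          have hstep : pvStep records (m, n) a =
              if p.2.1 > m then (p.2.1, p.2.2) else (m, n) := by
            unfold pvStep; rw [hf]
          have hna : pvName records a = p.2.2 := by simp [pvName, hf]
          by_cases hgt : p.2.1 > m
          · have hmax : max m (pvVal records a) = p.2.1 := by
              rw [hva]; exact max_eq_right (le_of_lt hgt)
            have hm' : (0:Int) ≤ p.2.1 := le_trans hm (le_of_lt hgt)
            rw [hfold, hstep, if_pos hgt, ih p.2.1 p.2.2 hm', hstepR, hmax]
            have hRgeb : p.2.1 ≤ pvRunMax records t p.2.1 := hRge p.2.1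
            have hRm : ¬ pvRunMax records t p.2.1 = m := by omega
            by_cases hR : pvRunMax records t p.2.1 = p.2.1
            · rw [if_pos hR, if_neg hRm,
                  List.find?_cons_of_pos (by rw [hva, hR]; simp)]
              rw [hR]
              simp [hna]
            · have hRgt : p.2.1 < pvRunMax records t p.2.1 := lt_of_le_of_ne hRgeb (Ne.symm hR)
              rcases pvRunMax_cases records t p.2.1 with h0 | ⟨k, hk, hkv⟩
              · exact absurd h0 hR
              · have hsome : (t.find? (fun k => pvVal records k == pvRunMax records t p.2.1)).isSome := by
                  rw [List.find?_isSome]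
                  exact ⟨k, hk, by simp [hkv]⟩
                obtain ⟨x, hx⟩ := Option.isSome_iff_exists.mp hsome
                rw [if_neg hR, if_neg hRm,
                    List.find?_cons_of_neg (by rw [hva]; simp; omega), hx]
                simp
          · have hmax : max m (pvVal records a) = m := by
              rw [hva]; exact max_eq_left (by omega)
            rw [hfold, hstep, if_neg hgt, ih m n hm, hstepR, hmax]
            by_cases hR : pvRunMax records t m = m
            · simp [hR]
            · have hRgt : m < pvRunMax records t m := lt_of_le_of_ne (hRge m) (Ne.symm hR)
              rw [if_neg hR, if_neg hR,
                  List.find?_cons_of_neg (by rw [hva]; simp; omega)]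

theorem pvFind_self (records : List (Int × Int × String))
    (hnd : (records.map (·.1)).Nodup) :
    ∀ p ∈ records, pvFind records p.1 = some p := by
  induction records with
  | nil => intro p hp; cases hp
  | cons q rest ih =>
      intro p hp
      simp only [List.map_cons, List.nodup_cons] at hnd
      rcases List.mem_cons.mp hp with h | h
      · subst h; simp [pvFind]
      · have hne : ¬ (q.1 == p.1) = true := by
          simp only [beq_iff_eq]
          intro hc
          exact hnd.1 (hc ▸ List.mem_map_of_mem h)
        have := ih hnd.2 p h
        unfold pvFind at this ⊢
        rw [List.find?_cons_of_neg (l := rest) (a := q) (p := fun r => r.1 == p.1) hne]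
        exact this

theorem pvFind?_sorted_min (p : Int → Bool) :
    ∀ (s : List Int), s.Pairwise (· ≤ ·) → ∀ x ∈ s, p x = true →
      (∀ y ∈ s, p y = true → x ≤ y) → s.find? p = some x := by
  intro s
  induction s with
  | nil => intro _ x hx; cases hx
  | cons a t ih =>
      intro hs x hx hpx hmin
      rcases List.pairwise_cons.mp hs with ⟨hale, ht⟩
      cases hpa : p a with
      | true =>
          have hax : x ≤ a := hmin a List.mem_cons_self hpa
          have hxa : a ≤ x := by
            rcases List.mem_cons.mp hx with h | h
            · omega
            · exact hale x h
          have hax2 : a = x := le_antisymm hxa hax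
          subst hax2
          exact List.find?_cons_of_pos hpa
      | false =>
          have hxt : x ∈ t := by
            rcases List.mem_cons.mp hx with h | h
            · subst h; rw [hpa] at hpx; cases hpx
            · exact h
          rw [List.find?_cons_of_neg (by simp [hpa])]
          exact ih ht x hxt hpx (fun y hy hpy => hmin y (List.mem_cons_of_mem _ hy) hpy)

-- ===== VERDICT (by name: the statement is the Claim_ definition above) =====
theorem search_and_print_winners_spec : Claim_equal_search_and_print_winners := by
  intro records _ hpre
  unfold Spec_search_and_print_winners
  unfold Pre_search_and_print_winners at hpre
  have hperm : (PySem.List.sorted (records.map (·.1)) (fun x => x) false).Perm (records.map (·.1)) :=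
    PySem.List.sorted_perm (records.map (·.1)) (fun x => x) false
  set s := PySem.List.sorted (records.map (·.1)) (fun x => x) false with hs
  have hsorted : s.Pairwise (· ≤ ·) := by
    have := PySem.List.sorted_pairwise (records.map (·.1)) (fun x => x)
    simpa [hs] using this
  have hmem_s : ∀ k, k ∈ s ↔ k ∈ records.map (·.1) := fun k => hperm.mem_iff
  have hfind_self : ∀ p ∈ records, pvFind records p.1 = some p := pvFind_self records hpre
  have hval_rec : ∀ p ∈ records, pvVal records p.1 = p.2.1 := by
    intro p hp; simp [pvVal, hfind_self p hp]
  have hkey_val : ∀ k ∈ s, ∃ p ∈ records, p.1 = k ∧ pvVal records k = p.2.1 ∧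
      pvName records k = p.2.2 := by
    intro k hk
    rcases List.mem_map.mp ((hmem_s k).mp hk) with ⟨p, hp, hpk⟩
    refine ⟨p, hp, hpk, ?_, ?_⟩
    · rw [← hpk]; exact hval_rec p hp
    · rw [← hpk]; simp [pvName, hfind_self p hp]
  cases hb : PySem.List.max? (records.map (fun p => p.2.1)) (fun x => x) with
  | none =>
      have hrec : records = [] :=
        List.map_eq_nil_iff.mp ((PySem.List.max?_eq_none_iff _ _).mp hb)
      subst hrec
      decide
  | some b =>
      have hbmem : b ∈ records.map (fun p => p.2.1) := PySem.List.max?_mem hb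
      have hbmax : ∀ v ∈ records.map (fun p => p.2.1), v ≤ b := by
        intro v hv
        have := PySem.List.max?_isMax hb v hv
        simpa using this
      have hval_le : ∀ k ∈ s, pvVal records k ≤ b := by
        intro k hk
        rcases hkey_val k hk with ⟨p, hp, _, hv, _⟩
        rw [hv]
        exact hbmax _ (List.mem_map_of_mem hp)
      have hM0 : (0:Int) ≤ pvRunMax records s 0 := pvRunMax_ge records s 0
      rw [pvPortA_eq, ← hs, pvFold_char records s 0 "" (le_refl 0)]
      by_cases hble : b ≤ 0
      · -- no positive result: both return ("", 0)
        have hMz : pvRunMax records s 0 = 0 := by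
          rcases pvRunMax_cases records s 0 with h | ⟨k, hk, hv⟩
          · exact h
          · have := hval_le k hk
            omega
        rw [if_pos hMz]
        have hB : search_and_print_winners_alt records = ("", 0) := by
          simp only [search_and_print_winners_alt, hb]
          rw [if_pos hble]
        rw [hB]
      · -- positive maximum b: A picks the first sorted key attaining b, B the min candidate key
        rcases List.mem_map.mp hbmem with ⟨pb, hpb, hpbv⟩
        have hMb : pvRunMax records s 0 = b := by
          have hge : b ≤ pvRunMax records s 0 := by
            have hkb : pb.1 ∈ s := (hmem_s pb.1).mpr (List.mem_map_of_mem hpb)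
            have h1 := pvRunMax_mem_le records s 0 pb.1 hkb
            rw [hval_rec pb hpb, hpbv] at h1
            exact h1
          have hle : pvRunMax records s 0 ≤ b := by
            rcases pvRunMax_cases records s 0 with h | ⟨k, hk, hv⟩
            · omega
            · rw [← hv]; exact hval_le k hk
          omega
        rw [hMb, if_neg (show ¬ b = 0 by omega)]
        rcases hmin : PySem.List.min? ((records.filter (fun p => p.2.1 == b)).map (·.1)) (fun x => x) with _ | c
        · have hpbc : pb.1 ∈ (records.filter (fun p => p.2.1 == b)).map (·.1) :=
            List.mem_map_of_mem (List.mem_filter.mpr ⟨hpb, by simp [hpbv]⟩)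
          rw [(PySem.List.min?_eq_none_iff _ _).mp hmin] at hpbc
          cases hpbc
        · have hcmem : c ∈ (records.filter (fun p => p.2.1 == b)).map (·.1) := PySem.List.min?_mem hmin
          have hcmin : ∀ y ∈ (records.filter (fun p => p.2.1 == b)).map (·.1), c ≤ y := by
            intro y hy
            have := PySem.List.min?_isMin hmin y hy
            simpa using this
          rcases List.mem_map.mp hcmem with ⟨q, hqf, hqc⟩
          have hq : q ∈ records := (List.mem_filter.mp hqf).1
          have hqb : q.2.1 = b := by
            have := (List.mem_filter.mp hqf).2
            simpa using this
          have hfc : pvFind records c = some q := by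
            rw [← hqc]; exact hfind_self q hq
          have hcs : c ∈ s := by
            rw [← hqc]; exact (hmem_s q.1).mpr (List.mem_map_of_mem hq)
          have hvc : pvVal records c = b := by
            simp [pvVal, hfc, hqb]
          have hfind : s.find? (fun k => pvVal records k == b) = some c := by
            apply pvFind?_sorted_min _ s hsorted c hcs
            · simp [hvc]
            · intro y hy hpy
              rcases hkey_val y hy with ⟨p', hp', hp'k, hv', _⟩
              have hp'b : p'.2.1 = b := by
                rw [← hv']; simpa using hpy
              apply hcmin
              rw [← hp'k]
              exact List.mem_map_of_mem (List.mem_filter.mpr ⟨hp', by simp [hp'b]⟩)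
          rw [hfind]
          have hB : search_and_print_winners_alt records = (q.2.2, b) := by
            simp only [search_and_print_winners_alt, hb]
            rw [if_neg hble, hmin]
            simp only [Option.getD_some]
            rw [show records.find? (fun p => p.1 == c) = some q from hfc]
          rw [hB]
          simp only [Option.map_some, Option.getD_some]
          rw [show pvName records c = q.2.2 from by simp [pvName, hfc]]
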